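-- pv_equiv track=rewrite | github.com/Sartastic/AHP | ahp.py | che_riga
-- ===== SOURCE A (Python) =====
-- def che_riga(numero, giud = ["a","b","c","e","f","g"],):
--     # for a number, return the position (row and column) in a
--     # triangular matrix
--     # all values are stored in a dictionay, called riga_colonna
--     num = 0            # initial value of numero
--     # i = 0              # erase!!
--     riga = 0           # initial row number
--     riga_colonna = {}  # row and column for each number in a list
--     while riga < len(giud):  #only for valid row
--         # print "riga: ", riga
--         num_last = num + len(giud) - 1 - riga # last row number + 1
--         # print "-- num_last + 1:", num_last
--         num_iniz = num
--         for j in range(num, num_last):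
--             riga_colonna[j]= (riga, riga + 1 + j - num_iniz )   # (j)%(len(giud))
--             # print "\t\tj: ", j
--             # print "\triga_colonna[",j,"]:", riga_colonna[j]
--             num += 1
--         num_last =  num + len(giud) - 1 - riga
--         riga += 1
--         # print "\t\t\tnum aggiornato:", num
--     # print riga_colonna
--
--     return riga_colonna[numero]
-- ===== SOURCE B (Python) =====
-- def che_riga(numero, giud = ["a","b","c","e","f","g"],):
--     # Closed-style O(n) search: walk the rows once, subtracting each row's
--     # block size, instead of materialising the whole triangular dictionary.
--     n = len(giud)
--     if numero < 0:
--         raise KeyError(numero)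
--     rem = numero
--     row = 0
--     while row < n:
--         size = n - 1 - row
--         if rem < size:
--             return (row, row + 1 + rem)
--         rem -= size
--         row += 1
--     raise KeyError(numero)
-- ===== Notes on version B (the rewrite author's own statement) =====
-- stated objective: faster
-- what changed: B walks the rows once, subtracting each row's block size to locate (row, col) directly, instead of A's building the entire triangular-matrix dictionary and then looking the number up.
import Mathlib
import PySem

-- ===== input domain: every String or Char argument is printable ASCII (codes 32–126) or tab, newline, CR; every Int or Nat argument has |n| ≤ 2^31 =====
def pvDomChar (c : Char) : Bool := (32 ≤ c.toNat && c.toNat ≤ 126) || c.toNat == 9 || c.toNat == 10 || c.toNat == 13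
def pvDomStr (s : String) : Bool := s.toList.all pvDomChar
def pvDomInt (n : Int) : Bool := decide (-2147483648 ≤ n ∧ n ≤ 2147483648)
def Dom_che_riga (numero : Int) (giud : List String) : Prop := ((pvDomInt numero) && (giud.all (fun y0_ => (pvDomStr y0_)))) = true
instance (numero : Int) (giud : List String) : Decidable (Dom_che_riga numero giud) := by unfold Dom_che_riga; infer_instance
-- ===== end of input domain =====

-- B replaces A's O(n^2) build-the-whole-dictionary approach with a single O(n) walk over the rows
-- subtracting block sizes (objective: faster, asymptotic).


-- ===== PORT A =====
-- while-loop over rows (fuel = number of remaining rows, riga runs 0..n-1);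
-- the inner for-loop carries the pair (dict, num) exactly as the Python mutates it.
def cheRigaLoop (n : Int) : Nat → Int → Int → PySem.Dict Int (List Int) → PySem.Dict Int (List Int)
  | 0, _, _, d => d
  | fuel+1, riga, num, d =>
      let num_last := num + n - 1 - riga
      let num_iniz := num
      let s := (PySem.List.pyRange num num_last 1).foldl
        (fun (s : PySem.Dict Int (List Int) × Int) j =>
          (s.1.insert j [riga, riga + 1 + j - num_iniz], s.2 + 1)) (d, num)
      cheRigaLoop n fuel (riga + 1) s.2 s.1

def che_riga (numero : Int) (giud : List String) : List Int :=
  let n : Int := giud.length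
  let riga_colonna := cheRigaLoop n n.toNat 0 0 PySem.Dict.empty
  -- riga_colonna[numero]: KeyError (none) is excluded by Pre_che_riga
  (riga_colonna.get? numero).getD []

-- ===== PORT B =====
-- walk the rows once, subtracting each row's block size (fuel = remaining rows)
def cheRigaAltGo (n : Int) : Nat → Int → Int → List Int
  | 0, _, _ => []          -- KeyError, excluded by Pre_che_riga
  | fuel+1, row, rem =>
      let size := n - 1 - row
      if rem < size then [row, row + 1 + rem]
      else cheRigaAltGo n fuel (row + 1) (rem - size)

def che_riga_alt (numero : Int) (giud : List String) : List Int :=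
  let n : Int := giud.length
  if numero < 0 then []    -- KeyError, excluded by Pre_che_riga
  else cheRigaAltGo n n.toNat 0 numero

-- ===== PRECONDITION & SPEC =====
-- exactly the inputs on which A returns: numero is one of the n*(n-1)/2 keys 0..n*(n-1)/2-1
-- of the triangular dictionary; elsewhere A raises KeyError.
def Pre_che_riga (numero : Int) (giud : List String) : Prop :=
  0 ≤ numero ∧ 2 * numero < (giud.length : Int) * ((giud.length : Int) - 1)
instance (numero : Int) (giud : List String) : Decidable (Pre_che_riga numero giud) := by unfold Pre_che_riga; infer_instance
def pvWitness_che_riga : Int × List String := (2, ["a", "b", "c"])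

def Spec_che_riga (numero : Int) (giud : List String) (out : List Int) : Prop := out = che_riga_alt numero giud
instance (numero : Int) (giud : List String) (out : List Int) : Decidable (Spec_che_riga numero giud out) := by unfold Spec_che_riga; infer_instance

-- ===== CLAIM (what is proved, stated in full; the proofs are below) =====
def Claim_equal_che_riga : Prop := ∀ (numero : Int) (giud : List String), Dom_che_riga numero giud → Pre_che_riga numero giud → Spec_che_riga numero giud (che_riga numero giud)

-- ===== LEMMAS AND PROOFS =====

-- number of dictionary entries produced by the remaining `fuel` rows starting at row `riga`
def totalSlots (n : Int) : Nat → Int → Int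
  | 0, _ => 0
  | fuel+1, riga => (n - 1 - riga) + totalSlots n fuel (riga + 1)

theorem totalSlots_nonneg (n : Int) : ∀ (fuel : Nat) (riga : Int), riga + fuel = n → 0 ≤ totalSlots n fuel riga := by
  intro fuel
  induction fuel with
  | zero => intro riga h; simp [totalSlots]
  | succ k ih =>
      intro riga h
      have h1 : (riga + 1) + (k : Int) = n := by push_cast at h ⊢; omega
      have := ih (riga + 1) h1
      simp only [totalSlots]
      omega

theorem two_mul_totalSlots (n : Int) : ∀ (fuel : Nat) (riga : Int), riga + fuel = n →
    2 * totalSlots n fuel riga = (fuel : Int) * ((fuel : Int) - 1) := by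
  intro fuel
  induction fuel with
  | zero => intro riga h; simp [totalSlots]
  | succ k ih =>
      intro riga h
      have h1 : (riga + 1) + (k : Int) = n := by push_cast at h ⊢; omega
      have := ih (riga + 1) h1
      simp only [totalSlots]
      push_cast at h ⊢
      nlinarith

theorem foldl_pair_insert (v : Int → List Int) :
    ∀ (l : List Int) (d : PySem.Dict Int (List Int)) (c : Int),
    l.foldl (fun (s : PySem.Dict Int (List Int) × Int) j => (s.1.insert j (v j), s.2 + 1)) (d, c)
      = (l.foldl (fun d j => d.insert j (v j)) d, c + l.length) := by
  intro l
  induction l with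
  | nil => intro d c; simp
  | cons x xs ih =>
      intro d c
      simp only [List.foldl_cons, List.length_cons, ih, Prod.mk.injEq, true_and]
      push_cast; ring

theorem foldl_insert_pyRange_get (v : Int → List Int) :
    ∀ (k : Nat) (a b q : Int) (d : PySem.Dict Int (List Int)), (b - a).toNat = k →
    ((PySem.List.pyRange a b 1).foldl (fun d j => d.insert j (v j)) d).get? q
      = if a ≤ q ∧ q < b then some (v q) else d.get? q := by
  intro k
  induction k with
  | zero =>
      intro a b q d hk
      have hb : b ≤ a := by omega
      have : PySem.List.pyRange a b 1 = [] := by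
        simp [PySem.List.pyRange_one, show (b - a).toNat = 0 by omega]
      rw [this]
      simp only [List.foldl_nil]
      split_ifs with h
      · omega
      · rfl
  | succ m ih =>
      intro a b q d hk
      have hab : a < b := by omega
      rw [PySem.List.pyRange_one_cons hab]
      simp only [List.foldl_cons]
      rw [ih (a + 1) b q _ (by omega)]
      rcases eq_or_ne q a with rfl | hne
      · have hnot : ¬ (q + 1 ≤ q ∧ q < b) := by omega
        rw [if_neg hnot, if_pos (by omega), PySem.Dict.get?_insert_self]
      · rw [PySem.Dict.get?_insert_of_ne _ _ hne]
        split_ifs with h1 h2 h2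
        · rfl
        · omega
        · omega
        · rfl

theorem cheRigaLoop_get (n : Int) :
    ∀ (fuel : Nat) (riga num q : Int) (d : PySem.Dict Int (List Int)), riga + fuel = n →
    (cheRigaLoop n fuel riga num d).get? q
      = if num ≤ q ∧ q - num < totalSlots n fuel riga
        then some (cheRigaAltGo n fuel riga (q - num)) else d.get? q := by
  intro fuel
  induction fuel with
  | zero =>
      intro riga num q d h
      simp only [cheRigaLoop, totalSlots]
      split_ifs with hc
      · omega
      · rfl
  | succ k ih =>
      intro riga num q d h
      have hsize : n - 1 - riga = (k : Int) := by push_cast at h; omega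
      have h1 : (riga + 1) + (k : Int) = n := by push_cast at h ⊢; omega
      have hT := totalSlots_nonneg n k (riga + 1) h1
      simp only [cheRigaLoop]
      rw [show num + n - 1 - riga = num + (k : Int) from by omega]
      rw [foldl_pair_insert]
      rw [PySem.List.length_pyRange_one]
      rw [show num + (k : Int) - num = (k : Int) from by ring, Int.toNat_natCast]
      rw [ih (riga + 1) (num + (k : Int)) q _ h1]
      rw [foldl_insert_pyRange_get _ k num (num + (k : Int)) q d (by omega)]
      simp only [totalSlots, cheRigaAltGo, hsize]
      split_ifs
      · exfalso; omega
      · simp only [Option.some.injEq]; congr 1; omega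
      · exfalso; omega
      · have he : riga + 1 + q - num = riga + 1 + (q - num) := by omega
        rw [he]
      · exfalso; omega
      · exfalso; omega
      · exfalso; omega
      · exfalso; omega
      · rfl

-- ===== VERDICT (by name: the statement is the Claim_ definition above) =====
theorem che_riga_spec : Claim_equal_che_riga := by
  intro numero giud _hdom hpre
  obtain ⟨h0, h2⟩ := hpre
  simp only [Spec_che_riga, che_riga, che_riga_alt]
  have hn0 : (0 : Int) ≤ (giud.length : Int) := by positivity
  have hfuel : (0 : Int) + ((giud.length : Int).toNat : Nat) = (giud.length : Int) := by
    omega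
  rw [cheRigaLoop_get (giud.length : Int) (giud.length : Int).toNat 0 0 numero PySem.Dict.empty hfuel]
  have htot := two_mul_totalSlots (giud.length : Int) (giud.length : Int).toNat 0 hfuel
  have hcast : (((giud.length : Int).toNat : Nat) : Int) = (giud.length : Int) := by omega
  rw [hcast] at htot
  have hcond : 0 ≤ numero ∧ numero - 0 < totalSlots (giud.length : Int) (giud.length : Int).toNat 0 := by
    constructor
    · exact h0
    · omega
  rw [if_pos hcond, if_neg (by omega : ¬ numero < 0)]
  simp only [Option.getD_some, Int.sub_zero]
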